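-- pv_equiv track=rewrite | github.com/kodingPy/AStarCastle | gameBoard.py | draw_square_path
-- ===== SOURCE A (Python) =====
-- def draw_square_path(start_x, start_y, distance):
-- 	"""Draws a square path from a cell at (start_x, start_y) in an 11*11 grid with distance = distance.
--
-- 	Args:
-- 	start_x: The x-coordinate of the start cell.
-- 	start_y: The y-coordinate of the start cell.
-- 	distance: The distance of the square path.
--
-- 	Returns:
-- 	A list of (x, y) coordinates of the square path.
-- 	"""
-- 	distance = distance * 2
--
--
-- 		# Create a list to store the square path.
-- 	square_path = []
-- 	start_x = start_x - distance // 2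
-- 	start_y = start_y - distance // 2
-- 	if 0 > start_x : start_x == 0
-- 	if 11 < start_x: start_x == 10
-- 	if 0 > start_y : start_y == 0
-- 	if 11 < start_y : start_y == 10
-- 	# Add the start top left cell to the square path.
--
--
-- 	# Move right by distance.
-- 	for i in range(distance ):
-- 		square_path.append((start_x + i + 1, start_y))
--
--
-- 	# Move down by distance.
-- 	for i in range(distance ):
-- 		square_path.append((start_x + distance, start_y + i + 1))
--
-- 	# Move left by distance.
-- 	for i in range(distance):
-- 		square_path.append((start_x + distance - i - 1, start_y + distance))
--
-- 	# Move up by distance.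
-- 	for i in range(distance):
-- 		square_path.append((start_x, start_y + distance - i - 1))
--
-- 	# Close the square path by adding the start cell again.
-- 	square_path.append((start_x, start_y))
--
--
-- 	# Return the square path.
-- 	return square_path
-- ===== SOURCE B (Python) =====
-- def draw_square_path(start_x, start_y, distance):
--     """Symmetry-based construction: build only the top edge explicitly, then
--     generate the other three edges by repeatedly rotating the edge 90 degrees
--     about the square's centre (which is a lattice point since the side is 2*distance)."""
--     d = distance * 2
--     sx = start_x - d // 2
--     sy = start_y - d // 2
--     cx, cy = sx + distance, sy + distance  # exact centre of the square
--
--     def rot(p):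
--         # rotate p by 90 degrees about (cx, cy)
--         x, y = p
--         return (cx - (y - cy), cy + (x - cx))
--
--     edge = [(sx + i, sy) for i in range(1, d + 1)]  # top edge, left to right
--     path = []
--     for _ in range(4):
--         path += edge
--         edge = [rot(p) for p in edge]
--     path.append((sx, sy))  # close the loop
--     return path
-- ===== Notes on version B (the rewrite author's own statement) =====
-- stated objective: alternative
-- what changed: Instead of A's four separate loops each computing a side's absolute coordinates, B constructs only the top edge and generates the remaining three sides by repeatedly rotating that edge 90 degrees about the square's centre (a lattice point since the side length 2*distance is even).
import Mathlib
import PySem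

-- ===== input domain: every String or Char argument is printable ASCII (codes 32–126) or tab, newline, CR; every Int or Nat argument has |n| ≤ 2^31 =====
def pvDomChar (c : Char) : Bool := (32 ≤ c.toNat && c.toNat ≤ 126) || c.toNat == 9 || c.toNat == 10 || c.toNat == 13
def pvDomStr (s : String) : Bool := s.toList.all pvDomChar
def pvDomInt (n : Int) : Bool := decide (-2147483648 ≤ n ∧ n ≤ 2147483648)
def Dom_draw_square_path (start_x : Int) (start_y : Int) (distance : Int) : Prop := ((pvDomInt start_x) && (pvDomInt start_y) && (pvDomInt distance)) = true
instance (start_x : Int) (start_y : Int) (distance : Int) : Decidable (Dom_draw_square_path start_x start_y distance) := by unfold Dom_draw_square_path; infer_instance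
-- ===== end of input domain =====

-- B builds only the top edge explicitly and derives the other three edges by rotating it
-- 90° about the square's centre; same cost as A's four coordinate-arithmetic loops.

-- ===== PORT A =====
def draw_square_path (start_x : Int) (start_y : Int) (distance : Int) : List (Int × Int) :=
  let distance := distance * 2
  let start_x := start_x - PySem.Int.floordiv distance 2
  let start_y := start_y - PySem.Int.floordiv distance 2
  -- the four 'if 0 > start_x : start_x == 0' lines compare and discard the result: no effect
  let sp : List (Int × Int) := []
  let sp := (PySem.List.pyRange 0 distance 1).foldl
    (fun acc i => acc ++ [(start_x + i + 1, start_y)]) sp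
  let sp := (PySem.List.pyRange 0 distance 1).foldl
    (fun acc i => acc ++ [(start_x + distance, start_y + i + 1)]) sp
  let sp := (PySem.List.pyRange 0 distance 1).foldl
    (fun acc i => acc ++ [(start_x + distance - i - 1, start_y + distance)]) sp
  let sp := (PySem.List.pyRange 0 distance 1).foldl
    (fun acc i => acc ++ [(start_x, start_y + distance - i - 1)]) sp
  sp ++ [(start_x, start_y)]

-- ===== PORT B =====
-- Source B's inner helper: rotate a point by 90 degrees about (cx, cy)
def rotAbout (cx cy : Int) (p : Int × Int) : Int × Int :=
  (cx - (p.2 - cy), cy + (p.1 - cx))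

def draw_square_path_alt (start_x : Int) (start_y : Int) (distance : Int) : List (Int × Int) :=
  let d := distance * 2
  let sx := start_x - PySem.Int.floordiv d 2
  let sy := start_y - PySem.Int.floordiv d 2
  let cx := sx + distance
  let cy := sy + distance
  let edge : List (Int × Int) := (PySem.List.pyRange 1 (d + 1) 1).map (fun i => (sx + i, sy))
  -- for _ in range(4): path += edge; edge = [rot(p) for p in edge]
  let st := (PySem.List.pyRange 0 4 1).foldl
    (fun (s : List (Int × Int) × List (Int × Int)) _ => (s.1 ++ s.2, s.2.map (rotAbout cx cy)))
    (([] : List (Int × Int)), edge)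
  st.1 ++ [(sx, sy)]

-- ===== PRECONDITION & SPEC =====
def Spec_draw_square_path (start_x : Int) (start_y : Int) (distance : Int) (out : List (Int × Int)) : Prop := out = draw_square_path_alt start_x start_y distance
instance (start_x : Int) (start_y : Int) (distance : Int) (out : List (Int × Int)) : Decidable (Spec_draw_square_path start_x start_y distance out) := by unfold Spec_draw_square_path; infer_instance

-- ===== CLAIM (what is proved, stated in full; the proofs are below) =====
def Claim_equal_draw_square_path : Prop := ∀ (start_x : Int) (start_y : Int) (distance : Int), Dom_draw_square_path start_x start_y distance → Spec_draw_square_path start_x start_y distance (draw_square_path start_x start_y distance)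

-- ===== LEMMAS AND PROOFS =====

theorem draw_square_path_spec : Claim_equal_draw_square_path := by
  intro X Y dist _dom
  unfold Spec_draw_square_path draw_square_path draw_square_path_alt
  simp only []
  set d := dist * 2 with hd
  set sx := X - PySem.Int.floordiv d 2 with hsx
  set sy := Y - PySem.Int.floordiv d 2 with hsy
  -- A's four append-loops become maps over the ranges
  rw [PySem.List.foldl_append_singleton_eq_map, PySem.List.foldl_append_singleton_eq_map,
      PySem.List.foldl_append_singleton_eq_map, PySem.List.foldl_append_singleton_eq_map]
  -- B's 4-iteration edge loop unfolds literally
  have h4 : PySem.List.pyRange 0 4 1 = [0, 1, 2, 3] := by decide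
  rw [h4]
  simp only [List.foldl_cons, List.foldl_nil, List.nil_append]
  -- both sides are concatenations of maps over List.range d.toNat
  have hedge : (d + 1 - 1) = d := by ring
  simp only [PySem.List.pyRange_one, hedge, sub_zero, List.map_map, List.append_assoc]
  congr 1
  · apply List.map_congr_left; intro j _
    simp only [Function.comp_apply, Prod.mk.injEq, and_true]
    omega
  congr 1
  · apply List.map_congr_left; intro j _
    simp only [Function.comp_apply, rotAbout, Prod.mk.injEq]
    omega
  congr 1
  · apply List.map_congr_left; intro j _
    simp only [Function.comp_apply, rotAbout, Prod.mk.injEq]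
    omega
  congr 1
  apply List.map_congr_left; intro j _
  simp only [Function.comp_apply, rotAbout, Prod.mk.injEq]
  omega
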